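-- pv_equiv track=rewrite | github.com/EliasAroni2000/automatas | Aroni-tp1-v2.py | tokenInt
-- ===== SOURCE A (Python) =====
-- estado_final = "estado final"
--
-- estadoNoFinal = "estado no aceptado"
--
-- estadoTrampa = "estado trampa"
--
-- def tokenInt(lexema):
--     estado = 0
--     estadoFinal = [3]
--     caracter = {0:{'i':1},1:{'n':2},2:{'t':3},3:{}}
--     for c in lexema:
--         if c in caracter[estado]:
--             estado = caracter[estado][c]
--         else:
--             estado = -1
--             break
--     if estado == -1:
--         return estadoTrampa
--     if estado in estadoFinal:
--         return estado_final
--     else: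
--         return estadoNoFinal
-- ===== SOURCE B (Python) =====
-- estado_final = "estado final"
--
-- estadoNoFinal = "estado no aceptado"
--
-- estadoTrampa = "estado trampa"
--
-- def tokenInt(lexema):
--     if lexema == "int":
--         return estado_final
--     if "int".startswith(lexema):
--         return estadoNoFinal
--     return estadoTrampa
-- ===== Notes on version B (the rewrite author's own statement) =====
-- stated objective: simpler
-- what changed: Replaces the DFA transition table and per-character state loop with a direct three-way classification: equality with "int", proper-prefix test via "int".startswith(lexema), else trap.
import Mathlib
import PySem

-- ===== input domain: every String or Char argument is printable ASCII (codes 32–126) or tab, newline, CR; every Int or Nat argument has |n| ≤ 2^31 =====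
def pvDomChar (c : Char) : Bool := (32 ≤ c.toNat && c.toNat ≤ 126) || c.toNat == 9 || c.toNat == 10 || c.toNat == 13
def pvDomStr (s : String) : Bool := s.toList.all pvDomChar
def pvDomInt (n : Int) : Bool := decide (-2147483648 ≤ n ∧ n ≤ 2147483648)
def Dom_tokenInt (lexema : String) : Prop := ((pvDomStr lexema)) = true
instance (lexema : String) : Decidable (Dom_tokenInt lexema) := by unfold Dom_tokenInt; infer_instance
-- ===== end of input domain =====

-- B replaces A's DFA transition table and per-character loop with two direct string tests (simpler).

-- ===== PORT A =====
-- caracter = {0:{'i':1},1:{'n':2},2:{'t':3},3:{}}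
def caracterA : PySem.Dict Int (PySem.Dict Char Int) :=
  PySem.Dict.ofList [(0, PySem.Dict.ofList [('i', 1)]),
                     (1, PySem.Dict.ofList [('n', 2)]),
                     (2, PySem.Dict.ofList [('t', 3)]),
                     (3, PySem.Dict.ofList [])]

-- the for-loop with break; 'estado' is always a key of caracterA, so caracter[estado] never raises
def tokenIntLoop : Int → List Char → Int
  | estado, [] => estado
  | estado, c :: rest =>
      match (PySem.Dict.getD caracterA estado PySem.Dict.empty).get? c with
      | some s => tokenIntLoop s rest
      | none => -1  -- estado = -1; break

def tokenInt (lexema : String) : String :=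
  let estado := tokenIntLoop 0 lexema.toList
  if estado = -1 then "estado trampa"
  else if estado ∈ ([3] : List Int) then "estado final"
  else "estado no aceptado"

-- ===== PORT B =====
def tokenInt_alt (lexema : String) : String :=
  if lexema == "int" then "estado final"
  else if PySem.Str.startswith "int" lexema then "estado no aceptado"
  else "estado trampa"

-- ===== PRECONDITION & SPEC =====
def Spec_tokenInt (lexema : String) (out : String) : Prop := out = tokenInt_alt lexema
instance (lexema : String) (out : String) : Decidable (Spec_tokenInt lexema out) := by unfold Spec_tokenInt; infer_instance

-- ===== CLAIM (what is proved, stated in full; the proofs are below) =====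
def Claim_equal_tokenInt : Prop := ∀ (lexema : String), Dom_tokenInt lexema → Spec_tokenInt lexema (tokenInt lexema)

-- ===== LEMMAS AND PROOFS =====

-- transition lookups of caracterA, characterized per state
theorem stepA0 (c : Char) :
    (PySem.Dict.getD caracterA 0 PySem.Dict.empty).get? c = if c = 'i' then some 1 else none := by
  have h : PySem.Dict.getD caracterA 0 PySem.Dict.empty = PySem.Dict.ofList [('i', 1)] := by decide
  rw [h]
  show ((PySem.Dict.empty : PySem.Dict Char Int).insert 'i' 1).get? c = _
  rw [PySem.Dict.get?_insert]
  simp [PySem.Dict.get?_empty]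

theorem stepA1 (c : Char) :
    (PySem.Dict.getD caracterA 1 PySem.Dict.empty).get? c = if c = 'n' then some 2 else none := by
  have h : PySem.Dict.getD caracterA 1 PySem.Dict.empty = PySem.Dict.ofList [('n', 2)] := by decide
  rw [h]
  show ((PySem.Dict.empty : PySem.Dict Char Int).insert 'n' 2).get? c = _
  rw [PySem.Dict.get?_insert]
  simp [PySem.Dict.get?_empty]

theorem stepA2 (c : Char) :
    (PySem.Dict.getD caracterA 2 PySem.Dict.empty).get? c = if c = 't' then some 3 else none := by
  have h : PySem.Dict.getD caracterA 2 PySem.Dict.empty = PySem.Dict.ofList [('t', 3)] := by decide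
  rw [h]
  show ((PySem.Dict.empty : PySem.Dict Char Int).insert 't' 3).get? c = _
  rw [PySem.Dict.get?_insert]
  simp [PySem.Dict.get?_empty]

theorem stepA3 (c : Char) :
    (PySem.Dict.getD caracterA 3 PySem.Dict.empty).get? c = none := by
  have h : PySem.Dict.getD caracterA 3 PySem.Dict.empty = PySem.Dict.ofList [] := by decide
  rw [h]
  exact PySem.Dict.get?_empty c

-- B's result as a function of the character list
theorem tokenInt_alt_toList (lexema : String) :
    tokenInt_alt lexema =
      (if lexema.toList = ['i','n','t'] then "estado final"
       else if lexema.toList <+: ['i','n','t'] then "estado no aceptado"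
       else "estado trampa") := by
  unfold tokenInt_alt
  have h1 : (lexema == "int") = decide (lexema.toList = ['i','n','t']) := by
    by_cases h : lexema.toList = ['i','n','t']
    · have : lexema = "int" := String.toList_inj.mp (by simp [h])
      simp [this]
    · have : lexema ≠ "int" := fun he => h (by simp [he])
      simp [this, h]
  have h2 : PySem.Str.startswith "int" lexema = decide (lexema.toList <+: ['i','n','t']) := by
    by_cases h : lexema.toList <+: ['i','n','t']
    · simp [h, PySem.Chars.startswith_iff, PySem.Str.startswith]
    · simp only [h, decide_false]
      by_contra hc
      simp only [Bool.not_eq_false] at hc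
      exact h (by simpa [PySem.Str.startswith, PySem.Chars.startswith_iff] using hc)
  rw [h1, h2]
  by_cases h : lexema.toList = ['i','n','t'] <;> simp [h]

-- ===== VERDICT (by name: the statement is the Claim_ definition above) =====
theorem tokenInt_spec : Claim_equal_tokenInt := by
  intro lexema _
  unfold Spec_tokenInt tokenInt
  rw [tokenInt_alt_toList]
  rcases hl : lexema.toList with _ | ⟨a, _ | ⟨b, _ | ⟨c, _ | ⟨d, rest⟩⟩⟩⟩ <;>
    simp only [tokenIntLoop, stepA0] <;>
    [ skip;
      by_cases ha : a = 'i';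
      (by_cases ha : a = 'i' <;> by_cases hb : b = 'n');
      (by_cases ha : a = 'i' <;> by_cases hb : b = 'n' <;> by_cases hc : c = 't');
      (by_cases ha : a = 'i' <;> by_cases hb : b = 'n' <;> by_cases hc : c = 't')] <;>
    simp_all [stepA1, stepA2, stepA3, List.cons_prefix_cons]
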